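-- pv_equiv track=rewrite | github.com/planetlevel/sar | sar/agents/endpoint_authorization.py | _summarize_enforcement_points
-- ===== SOURCE A (Python) =====
-- from typing import Dict, Any, List, Optional
--
-- def _summarize_enforcement_points(endpoints: List[Dict]) -> str:
--     """
--     Summarize where authorization is enforced across all endpoints
--
--     Args:
--         endpoints: List of endpoint dicts
--
--     Returns:
--         String summary of enforcement point counts
--     """
--     enforcement_counts = {}
--     for endpoint in endpoints:
--         for auth in endpoint.get('authorizations', []):
--             point = auth.get('enforcement_point', 'unknown')
--             enforcement_counts[point] = enforcement_counts.get(point, 0) + 1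
--
--     if not enforcement_counts:
--         return "No authorization enforcement detected"
--
--     return "\n".join(f"  - {point}: {count} instances"
--                      for point, count in sorted(enforcement_counts.items()))
-- ===== SOURCE B (Python) =====
-- def _group_runs(xs):
--     """xs sorted; return [(label, run length)] for each maximal run."""
--     if not xs:
--         return []
--     head = xs[0]
--     i = 1
--     while i < len(xs) and xs[i] == head:
--         i += 1
--     return [(head, i)] + _group_runs(xs[i:])
--
--
-- def _summarize_enforcement_points(endpoints):
--     labels = [auth.get('enforcement_point', 'unknown')
--               for endpoint in endpoints
--               for auth in endpoint.get('authorizations', [])]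
--     if not labels:
--         return "No authorization enforcement detected"
--     return "\n".join(f"  - {point}: {count} instances"
--                      for point, count in _group_runs(sorted(labels)))
-- ===== Notes on version B (the rewrite author's own statement) =====
-- stated objective: alternative
-- what changed: Replaces the hash-map counter accumulated inside nested loops by a staged pipeline: flatten all enforcement-point labels into one list, sort it, and group maximal equal runs recursively; counts come from run lengths instead of dict updates.
import Mathlib
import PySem

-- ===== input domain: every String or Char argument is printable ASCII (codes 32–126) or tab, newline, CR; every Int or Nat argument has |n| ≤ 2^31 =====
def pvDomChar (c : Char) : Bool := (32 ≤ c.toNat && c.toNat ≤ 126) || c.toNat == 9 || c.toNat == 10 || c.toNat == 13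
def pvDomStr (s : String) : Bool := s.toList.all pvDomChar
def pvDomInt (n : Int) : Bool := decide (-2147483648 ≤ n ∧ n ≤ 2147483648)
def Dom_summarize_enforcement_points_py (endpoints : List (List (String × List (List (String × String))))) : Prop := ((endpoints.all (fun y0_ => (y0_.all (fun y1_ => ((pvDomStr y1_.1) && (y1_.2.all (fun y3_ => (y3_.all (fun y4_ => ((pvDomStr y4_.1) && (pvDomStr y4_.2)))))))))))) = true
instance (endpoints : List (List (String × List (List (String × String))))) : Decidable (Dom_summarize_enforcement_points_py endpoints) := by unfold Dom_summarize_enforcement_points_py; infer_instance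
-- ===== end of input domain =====

-- B replaces A's dict-counter accumulated in nested loops by a staged pipeline (flatten labels, sort, group equal runs); alternative decomposition, same results.

-- ===== PORT A =====
def summarize_enforcement_points_py (endpoints : List (List (String × List (List (String × String))))) : String :=
  let counts : PySem.Dict String Int :=
    endpoints.foldl (fun d ep =>
      (PySem.Dict.getD (PySem.Dict.mk ep) "authorizations" []).foldl (fun d auth =>
        let point := PySem.Dict.getD (PySem.Dict.mk auth) "enforcement_point" "unknown"
        d.insert point (d.getD point 0 + 1)) d) PySem.Dict.empty
  if counts.items = [] then "No authorization enforcement detected"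
  else PySem.Str.join "\n" ((PySem.List.sorted2 counts.items Prod.fst Prod.snd false).map
      (fun pc => "  - " ++ pc.1 ++ ": " ++ PySem.Int.toStr pc.2 ++ " instances"))

-- ===== PORT B =====
-- run length of the leading run of x in t (the 'while' loop of _group_runs)
def pvRunLen (x : String) : List String → Nat
  | [] => 0
  | y :: t => if y = x then pvRunLen x t + 1 else 0

def pvGroupRuns : List String → List (String × Int)
  | [] => []
  | x :: t =>
    (x, (pvRunLen x t : Int) + 1) :: pvGroupRuns (t.drop (pvRunLen x t))
termination_by l => l.length
decreasing_by simp only [List.length_drop, List.length_cons]; omega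

def summarize_enforcement_points_py_alt (endpoints : List (List (String × List (List (String × String))))) : String :=
  let labels : List String :=
    endpoints.flatMap (fun ep =>
      (PySem.Dict.getD (PySem.Dict.mk ep) "authorizations" []).map (fun auth =>
        PySem.Dict.getD (PySem.Dict.mk auth) "enforcement_point" "unknown"))
  if labels = [] then "No authorization enforcement detected"
  else PySem.Str.join "\n" ((pvGroupRuns (PySem.List.sorted labels (fun x => x))).map
      (fun pc => "  - " ++ pc.1 ++ ": " ++ PySem.Int.toStr pc.2 ++ " instances"))

-- ===== PRECONDITION & SPEC =====
def Spec_summarize_enforcement_points_py (endpoints : List (List (String × List (List (String × String))))) (out : String) : Prop := out = summarize_enforcement_points_py_alt endpoints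
instance (endpoints : List (List (String × List (List (String × String))))) (out : String) : Decidable (Spec_summarize_enforcement_points_py endpoints out) := by unfold Spec_summarize_enforcement_points_py; infer_instance

-- ===== CLAIM (what is proved, stated in full; the proofs are below) =====
def Claim_equal_summarize_enforcement_points_py : Prop := ∀ (endpoints : List (List (String × List (List (String × String))))), Dom_summarize_enforcement_points_py endpoints → Spec_summarize_enforcement_points_py endpoints (summarize_enforcement_points_py endpoints)

-- ===== LEMMAS AND PROOFS =====

-- every element of the counted prefix equals x
theorem pvRunLen_take (x : String) (t : List String) :
    ∀ y ∈ t.take (pvRunLen x t), y = x := by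
  induction t with
  | nil => simp [pvRunLen]
  | cons z t ih =>
    by_cases h : z = x
    · simpa [pvRunLen, h] using ih
    · simp [pvRunLen, h]

-- the first element after the run (if any) differs from x
theorem pvRunLen_drop_head (x : String) (t : List String) :
    ∀ z r, t.drop (pvRunLen x t) = z :: r → z ≠ x := by
  induction t with
  | nil => simp
  | cons w t ih =>
    by_cases h : w = x
    · simpa [pvRunLen, h] using ih
    · intro z r hzr
      simp only [pvRunLen, h, if_false, List.drop_zero] at hzr
      cases hzr; simpa using h

-- in a sorted list x :: t, everything after the leading run is strictly greater than x
theorem pvRunLen_drop_gt (x : String) (t : List String)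
    (hs : (x :: t).Pairwise (· ≤ ·)) :
    ∀ w ∈ t.drop (pvRunLen x t), x < w := by
  rcases hdrop : t.drop (pvRunLen x t) with _ | ⟨z, r⟩
  · simp
  · have hzx : z ≠ x := pvRunLen_drop_head x t z r hdrop
    have hxz : x ≤ z := by
      have hz : z ∈ t := by
        have : z ∈ t.drop (pvRunLen x t) := by simp [hdrop]
        exact List.mem_of_mem_drop this
      exact (List.pairwise_cons.mp hs).1 z hz
    have hxz' : x < z := lt_of_le_of_ne hxz (Ne.symm hzx)
    intro w hw
    rcases List.mem_cons.mp hw with rfl | hw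
    · exact hxz'
    · have hp : (z :: r).Pairwise (· ≤ ·) := by
        have := (List.pairwise_cons.mp hs).2
        have hsub : (t.drop (pvRunLen x t)).Sublist t := List.drop_sublist _ _
        rw [hdrop] at hsub
        exact List.Pairwise.sublist hsub this
      exact lt_of_lt_of_le hxz' ((List.pairwise_cons.mp hp).1 w hw)

theorem pvRunLen_le (x : String) (t : List String) : pvRunLen x t ≤ t.length := by
  induction t with
  | nil => simp [pvRunLen]
  | cons z t ih => by_cases h : z = x <;> simp [pvRunLen, h] <;> omega

-- count of x in x :: t is the run length + 1 (sorted)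
theorem count_head_run (x : String) (t : List String)
    (hs : (x :: t).Pairwise (· ≤ ·)) :
    (x :: t).count x = pvRunLen x t + 1 := by
  have hsplit := List.take_append_drop (pvRunLen x t) t
  have htake : (t.take (pvRunLen x t)).count x = pvRunLen x t := by
    rw [List.count_eq_length.mpr (by intro b hb; exact (pvRunLen_take x t b hb).symm)]
    simp [List.length_take, Nat.min_eq_left (pvRunLen_le x t)]
  have hdrop : (t.drop (pvRunLen x t)).count x = 0 := by
    rw [List.count_eq_zero]
    intro hmem
    exact absurd rfl (ne_of_gt (pvRunLen_drop_gt x t hs x hmem))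
  calc (x :: t).count x = t.count x + 1 := by simp
    _ = pvRunLen x t + 1 := by
        conv_lhs => rw [← hsplit]
        rw [List.count_append, htake, hdrop]

-- count of k ≠ x in x :: t equals its count after the run
theorem count_other_run (x k : String) (t : List String) (hk : k ≠ x) :
    (x :: t).count k = (t.drop (pvRunLen x t)).count k := by
  have hsplit := List.take_append_drop (pvRunLen x t) t
  have htake : (t.take (pvRunLen x t)).count k = 0 := by
    rw [List.count_eq_zero]
    intro hmem
    exact hk (pvRunLen_take x t k hmem)
  calc (x :: t).count k = t.count k := by simp [List.count_cons, Ne.symm hk]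
    _ = _ := by conv_lhs => rw [← hsplit]
                rw [List.count_append, htake]; omega

-- membership through the run
theorem mem_run_iff (x k : String) (t : List String) :
    k ∈ x :: t ↔ k = x ∨ k ∈ t.drop (pvRunLen x t) := by
  constructor
  · intro h
    rcases List.mem_cons.mp h with rfl | h
    · exact Or.inl rfl
    · by_cases hk : k = x
      · exact Or.inl hk
      · right
        conv at h => rw [← List.take_append_drop (pvRunLen x t) t]
        rcases List.mem_append.mp h with h | h
        · exact absurd (pvRunLen_take x t k h) hk
        · exact h
  · rintro (rfl | h)
    · exact List.mem_cons_self
    · exact List.mem_cons_of_mem _ (List.mem_of_mem_drop h)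

-- the grouped runs of a sorted list: strictly increasing keys, keys = members, counts exact
theorem pvGroupRuns_spec : ∀ S : List String, S.Pairwise (· ≤ ·) →
    ((pvGroupRuns S).Pairwise (fun a b => a.1 < b.1)) ∧
    (∀ p ∈ pvGroupRuns S, p.1 ∈ S ∧ p.2 = (S.count p.1 : Int)) ∧
    (∀ k ∈ S, ∃ p ∈ pvGroupRuns S, p.1 = k) := by
  intro S
  induction S using pvGroupRuns.induct with
  | case1 => simp [pvGroupRuns]
  | case2 x t ih =>
    intro hs
    have hD : (t.drop (pvRunLen x t)).Pairwise (· ≤ ·) := by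
      refine List.Pairwise.sublist ?_ hs
      exact (List.drop_sublist _ _).trans (List.sublist_cons_self x t)
    obtain ⟨ih1, ih2, ih3⟩ := ih hD
    have hgt := pvRunLen_drop_gt x t hs
    refine ⟨?_, ?_, ?_⟩
    · rw [pvGroupRuns, List.pairwise_cons]
      refine ⟨?_, ih1⟩
      intro b hb
      exact hgt b.1 ((ih2 b hb).1)
    · rw [pvGroupRuns]
      intro p hp0
      rcases List.mem_cons.mp hp0 with rfl | hp
      · refine ⟨List.mem_cons_self, ?_⟩
        rw [count_head_run x t hs]
        push_cast; ring
      · obtain ⟨h1, h2⟩ := ih2 p hp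
        have hne : p.1 ≠ x := ne_of_gt (hgt p.1 h1)
        refine ⟨List.mem_cons_of_mem _ (List.mem_of_mem_drop h1), ?_⟩
        rw [count_other_run x p.1 t hne]
        exact h2
    · intro k hk
      rcases (mem_run_iff x k t).mp hk with rfl | hk
      · exact ⟨(k, (pvRunLen k t : Int) + 1), by rw [pvGroupRuns]; simp⟩
      · obtain ⟨p, hp1, hp2⟩ := ih3 k hk
        exact ⟨p, by rw [pvGroupRuns]; exact List.mem_cons_of_mem _ hp1, hp2⟩

-- the specialised order of Python's sorted(items): any strictly fst-increasing rearrangement is it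
-- the comparison sorted2 uses (lexicographic on (fst, snd))
def pvBefore (a b : String × Int) : Bool :=
  decide (a.1 < b.1) || (!decide (b.1 < a.1) && decide (a.2 < b.2))

theorem insertBy_pvBefore_pairwise (x : String × Int) (ys : List (String × Int))
    (h : ys.Pairwise (fun a b => a.1 ≤ b.1)) :
    (PySem.List.insertBy pvBefore x ys).Pairwise (fun a b => a.1 ≤ b.1) := by
  induction ys with
  | nil => simp [PySem.List.insertBy]
  | cons y ys ih =>
    rw [List.pairwise_cons] at h
    by_cases hb : pvBefore x y = true
    · have hxy : x.1 ≤ y.1 := by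
        simp only [pvBefore, Bool.or_eq_true, Bool.and_eq_true, Bool.not_eq_true',
          decide_eq_true_eq, decide_eq_false_iff_not] at hb
        rcases hb with h1 | ⟨h1, -⟩
        · exact le_of_lt h1
        · exact le_of_not_gt h1
      rw [PySem.List.insertBy, if_pos hb]
      refine List.pairwise_cons.mpr ⟨?_, List.pairwise_cons.mpr h⟩
      intro b hbmem
      rcases List.mem_cons.mp hbmem with rfl | hbmem
      · exact hxy
      · exact hxy.trans (h.1 b hbmem)
    · rw [PySem.List.insertBy, if_neg hb]
      have hyx : y.1 ≤ x.1 := by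
        simp only [pvBefore, Bool.or_eq_true, Bool.and_eq_true, Bool.not_eq_true',
          decide_eq_true_eq, decide_eq_false_iff_not] at hb
        push Not at hb
        exact le_of_not_gt hb.1
      refine List.pairwise_cons.mpr ⟨?_, ih h.2⟩
      intro b hbmem
      rcases (PySem.List.insertBy_mem_iff pvBefore x b ys).mp hbmem with rfl | hbmem
      · exact hyx
      · exact h.1 b hbmem

theorem foldl_insertBy_pvBefore_pairwise (xs : List (String × Int)) :
    ∀ acc : List (String × Int), acc.Pairwise (fun a b => a.1 ≤ b.1) →
    (xs.foldl (fun acc x => PySem.List.insertBy pvBefore x acc) acc).Pairwise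
      (fun a b => a.1 ≤ b.1) := by
  induction xs with
  | nil => intro acc h; simpa using h
  | cons x xs ih =>
    intro acc h
    simpa using ih _ (insertBy_pvBefore_pairwise x acc h)

theorem sorted2_eq_of_pairwise_fst_lt (xs ys : List (String × Int))
    (hperm : ys.Perm xs) (hlt : ys.Pairwise (fun a b => a.1 < b.1)) :
    PySem.List.sorted2 xs Prod.fst Prod.snd false = ys := by
  have hunf : PySem.List.sorted2 xs Prod.fst Prod.snd false
      = xs.foldl (fun acc x => PySem.List.insertBy pvBefore x acc) [] := rfl
  refine PySem.List.eq_of_perm_of_pairwise_le_of_pairwise_lt Prod.fst ?_ ?_ hlt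
  · rw [hunf]
    exact ((PySem.List.foldl_insertBy_perm pvBefore xs []).trans (by simp)).trans hperm.symm
  · rw [hunf]
    exact foldl_insertBy_pvBefore_pairwise xs [] (by simp)

-- A's nested fold is the counter of B's flattened label list
theorem counts_eq_counter (endpoints : List (List (String × List (List (String × String))))) :
    endpoints.foldl (fun d ep =>
      (PySem.Dict.getD (PySem.Dict.mk ep) "authorizations" []).foldl (fun d auth =>
        let point := PySem.Dict.getD (PySem.Dict.mk auth) "enforcement_point" "unknown"
        d.insert point (d.getD point 0 + 1)) d) PySem.Dict.empty
    = PySem.Dict.counter (endpoints.flatMap (fun ep =>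
        (PySem.Dict.getD (PySem.Dict.mk ep) "authorizations" []).map (fun auth =>
          PySem.Dict.getD (PySem.Dict.mk auth) "enforcement_point" "unknown"))) := by
  rw [← PySem.Dict.foldl_insert_getD_add_one_eq_counter, ← List.map_flatMap,
    List.foldl_map, List.foldl_flatMap]

-- main list equality: sorted counter items = grouped runs of the sorted labels
theorem main_eq (L : List String) :
    PySem.List.sorted2 (PySem.Dict.counter L).items Prod.fst Prod.snd false
      = pvGroupRuns (PySem.List.sorted L (fun x => x)) := by
  obtain ⟨h1, h2, h3⟩ :=
    pvGroupRuns_spec (PySem.List.sorted L (fun x => x))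
      (PySem.List.sorted_pairwise L (fun x => x))
  set S := PySem.List.sorted L (fun x => x) with hS
  set ys := pvGroupRuns S with hys
  have hSL : S.Perm L := PySem.List.sorted_perm L (fun x => x) false
  have hf : ∀ p ∈ ys, (fun k => (k, (L.count k : Int))) p.1 = p := by
    intro p hp
    obtain ⟨-, hcnt⟩ := h2 p hp
    have : (L.count p.1 : Int) = p.2 := by rw [hcnt, hSL.count_eq]
    simpa [Prod.ext_iff] using this
  have hkeys : (ys.map Prod.fst).Perm (PySem.Set.ofList L) := by
    rw [List.perm_ext_iff_of_nodup ?_ (PySem.Set.nodup_ofList L)]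
    · intro k
      rw [PySem.Set.mem_ofList]
      constructor
      · intro hk
        obtain ⟨p, hp, rfl⟩ := List.mem_map.mp hk
        exact hSL.mem_iff.mp (h2 p hp).1
      · intro hk
        obtain ⟨p, hp, hpk⟩ := h3 k (hSL.mem_iff.mpr hk)
        exact List.mem_map.mpr ⟨p, hp, hpk⟩
    · have : (ys.map Prod.fst).Pairwise (· < ·) := List.pairwise_map.mpr h1
      exact this.imp ne_of_lt
  have hys_eq : ys = (ys.map Prod.fst).map (fun k => (k, (L.count k : Int))) := by
    rw [List.map_map]
    exact (List.map_congr_left hf).symm ▸ (List.map_id ys).symm ▸ rfl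
  apply sorted2_eq_of_pairwise_fst_lt _ _ ?_ h1
  rw [PySem.Dict.items_counter, hys_eq]
  exact hkeys.map _

-- ===== VERDICT (by name: the statement is the Claim_ definition above) =====
theorem counter_items_eq_nil_iff (L : List String) :
    (PySem.Dict.counter L).items = [] ↔ L = [] := by
  rw [PySem.Dict.items_counter, List.map_eq_nil_iff]
  constructor
  · intro h
    cases hL : L with
    | nil => rfl
    | cons a t =>
      exfalso
      have : a ∈ PySem.Set.ofList L := (PySem.Set.mem_ofList L a).mpr (by simp [hL])
      simp [h] at this
  · rintro rfl; rfl

theorem summarize_enforcement_points_py_spec : Claim_equal_summarize_enforcement_points_py := by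
  intro endpoints _
  unfold Spec_summarize_enforcement_points_py
  unfold summarize_enforcement_points_py summarize_enforcement_points_py_alt
  rw [counts_eq_counter]
  set L := endpoints.flatMap (fun ep =>
    (PySem.Dict.getD (PySem.Dict.mk ep) "authorizations" []).map (fun auth =>
      PySem.Dict.getD (PySem.Dict.mk auth) "enforcement_point" "unknown")) with hL
  by_cases h : L = []
  · simp [h, counter_items_eq_nil_iff]
  · rw [if_neg ((not_iff_not.mpr (counter_items_eq_nil_iff L)).mpr h), if_neg h, main_eq L]
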